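-- pv_equiv track=rewrite | github.com/robinkashyap/CP-Coding | 2D-Array/LargestSumCol.py | largeSumColumn
-- ===== SOURCE A (Python) =====
-- def largeSumColumn(list, row, col):
--     column = -1
--     out = 0
--     for j in range(col):
--         sum = 0
--         for i in range(row):
--             sum += list[i][j]
--         # for ele in list:
--         #     sum += ele[j]
--         if out < sum:
--             out = sum
--             column = j
--     return out, column
-- ===== SOURCE B (Python) =====
-- def largeSumColumn(list, row, col):
--     sums = [0] * col
--     for _, r in zip(range(row), list):
--         sums = [s + x for s, x in zip(sums, r)]
--     out = 0
--     column = -1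
--     for j in range(col):
--         if out < sums[j]:
--             out = sums[j]
--             column = j
--     return out, column
-- ===== Notes on version B (the rewrite author's own statement) =====
-- stated objective: alternative
-- what changed: B accumulates all column sums in one row-wise pass (zipping each row into a running sums vector) instead of A's column-outer/row-inner nested index loops, then selects the maximum in a separate scan.
import Mathlib
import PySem

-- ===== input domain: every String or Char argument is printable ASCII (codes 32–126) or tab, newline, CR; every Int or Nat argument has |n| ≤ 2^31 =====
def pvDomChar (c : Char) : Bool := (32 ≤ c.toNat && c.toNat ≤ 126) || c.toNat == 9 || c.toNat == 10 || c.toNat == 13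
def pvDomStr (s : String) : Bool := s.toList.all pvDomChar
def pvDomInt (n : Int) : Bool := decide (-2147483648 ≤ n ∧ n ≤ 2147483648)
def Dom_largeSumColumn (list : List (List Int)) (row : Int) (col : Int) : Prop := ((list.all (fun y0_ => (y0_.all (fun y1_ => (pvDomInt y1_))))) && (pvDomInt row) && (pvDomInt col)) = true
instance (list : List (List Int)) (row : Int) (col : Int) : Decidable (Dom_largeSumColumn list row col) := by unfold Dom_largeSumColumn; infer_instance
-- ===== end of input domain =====

-- B replaces A's column-outer/row-inner index loops by one row-wise zip-accumulation of all
-- column sums followed by a separate max scan; same asymptotic cost (alternative decomposition).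


-- ===== PORT A =====
def largeSumColumn (list : List (List Int)) (row : Int) (col : Int) : Int × Int :=
  -- state (out, column); column = -1, out = 0
  (PySem.List.pyRange 0 col 1).foldl
    (fun (st : Int × Int) (j : Int) =>
      let sum := (PySem.List.pyRange 0 row 1).foldl
        (fun (s : Int) (i : Int) => s + PySem.List.pyGetD (PySem.List.pyGetD list i []) j 0) 0
      if st.1 < sum then (sum, j) else st)
    (0, -1)

-- ===== PORT B =====
def largeSumColumn_alt (list : List (List Int)) (row : Int) (col : Int) : Int × Int :=
  -- sums = [0]*col; for _, r in zip(range(row), list): sums = [s + x for s, x in zip(sums, r)]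
  let sums := (List.zip (PySem.List.pyRange 0 row 1) list).foldl
    (fun (sums : List Int) (p : Int × List Int) =>
      List.zipWith (fun s x => s + x) sums p.2)
    (List.replicate col.toNat 0)
  -- out = 0; column = -1; for j in range(col): if out < sums[j]: out, column = sums[j], j
  -- Python lists are arrays; sums[j] is ported as an O(1) array lookup (j ∈ range(col) is
  -- nonnegative, so .toNat is exact here)
  let sumsArr := sums.toArray
  (PySem.List.pyRange 0 col 1).foldl
    (fun (st : Int × Int) (j : Int) =>
      let v := sumsArr.getD j.toNat 0
      if st.1 < v then (v, j) else st)
    (0, -1)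

-- ===== PRECONDITION & SPEC =====
-- Pre_ excludes exactly the inputs on which Python A raises IndexError: with a nonempty loop
-- space (0 < row and 0 < col), some i < row is out of range of list, or some accessed row is
-- shorter than col.
def Pre_largeSumColumn (list : List (List Int)) (row : Int) (col : Int) : Prop :=
  0 < row → 0 < col →
    row ≤ (list.length : Int) ∧ ∀ r ∈ list.take row.toNat, col ≤ (r.length : Int)
instance (list : List (List Int)) (row : Int) (col : Int) : Decidable (Pre_largeSumColumn list row col) := by unfold Pre_largeSumColumn; infer_instance

def pvWitness_largeSumColumn : List (List Int) × Int × Int := ([[1, -2], [3, 4]], 2, 2)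

def Spec_largeSumColumn (list : List (List Int)) (row : Int) (col : Int) (out : Int × Int) : Prop := out = largeSumColumn_alt list row col
instance (list : List (List Int)) (row : Int) (col : Int) (out : Int × Int) : Decidable (Spec_largeSumColumn list row col out) := by unfold Spec_largeSumColumn; infer_instance

-- ===== CLAIM (what is proved, stated in full; the proofs are below) =====
def Claim_equal_largeSumColumn : Prop := ∀ (list : List (List Int)) (row : Int) (col : Int), Dom_largeSumColumn list row col → Pre_largeSumColumn list row col → Spec_largeSumColumn list row col (largeSumColumn list row col)

-- ===== LEMMAS AND PROOFS =====

-- Folding with zip(range(row), list) only uses the row component: it is a fold over the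
-- first l1.length rows of l2.
lemma foldl_zip_snd {α β γ : Type} (l1 : List α) (l2 : List β) (g : γ → β → γ) (init : γ) :
    (List.zip l1 l2).foldl (fun a p => g a p.2) init = (l2.take l1.length).foldl g init := by
  induction l1 generalizing l2 init with
  | nil => simp
  | cons a l1 ih =>
    cases l2 with
    | nil => simp
    | cons b l2 => simp [ih]

-- After folding the first n rows, B's sums vector has length col.toNat and its j-th entry is
-- exactly A's inner row sum over those n rows, provided the first n rows exist and each has
-- length ≥ col.
lemma sums_invariant (list : List (List Int)) (col : Int) (n : Nat)
    (hn : n ≤ list.length)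
    (hrows : ∀ r ∈ list.take n, col ≤ (r.length : Int)) :
    ((list.take n).foldl
        (fun (sums : List Int) (r : List Int) => List.zipWith (fun s x => s + x) sums r)
        (List.replicate col.toNat 0)).length = col.toNat ∧
    ∀ j : Int, 0 ≤ j → j < col →
      PySem.List.pyGetD
        ((list.take n).foldl
          (fun (sums : List Int) (r : List Int) => List.zipWith (fun s x => s + x) sums r)
          (List.replicate col.toNat 0)) j 0 =
      (PySem.List.pyRange 0 (n : Int) 1).foldl
        (fun (s : Int) (i : Int) => s + PySem.List.pyGetD (PySem.List.pyGetD list i []) j 0) 0 := by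
  induction n with
  | zero =>
    rw [PySem.List.pyRange_one_eq_nil (by omega)]
    refine ⟨by simp, ?_⟩
    intro j hj0 hjc
    rw [List.take_zero, List.foldl_nil, List.foldl_nil,
      PySem.List.pyGetD_eq_getElem _ _ hj0 (by simp; omega)]
    simp
  | succ n ih =>
    have hlt : n < list.length := by omega
    have hrows' : ∀ r ∈ list.take n, col ≤ (r.length : Int) := by
      intro r hr
      rw [List.mem_take_iff_getElem] at hr
      obtain ⟨k, hk, rfl⟩ := hr
      exact hrows _ (List.mem_take_iff_getElem.mpr ⟨k, by omega, rfl⟩)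
    obtain ⟨ihlen, ihget⟩ := ih (by omega) hrows'
    have htake : list.take (n + 1) = list.take n ++ [list[n]] := by
      rw [List.take_add_one, List.getElem?_eq_getElem hlt]
      rfl
    have hrange : PySem.List.pyRange 0 ((n + 1 : Nat) : Int) 1
        = PySem.List.pyRange 0 (n : Int) 1 ++ [(n : Int)] := by
      push_cast
      exact PySem.List.pyRange_one_succ_right (by positivity)
    have hrowlen : col ≤ ((list[n]).length : Int) := by
      apply hrows
      rw [List.mem_take_iff_getElem]
      exact ⟨n, by omega, rfl⟩
    have hrowget : PySem.List.pyGetD list ((n : Nat) : Int) [] = list[n] := by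
      simp [PySem.List.pyGetD_natCast, List.getD_eq_getElem?_getD, hlt]
    constructor
    · rw [htake, List.foldl_append]
      simp only [List.foldl_cons, List.foldl_nil]
      rw [List.length_zipWith, ihlen]
      omega
    · intro j hj0 hjc
      rw [htake, hrange, List.foldl_append, List.foldl_append]
      simp only [List.foldl_cons, List.foldl_nil]
      have hlen2 : (List.zipWith (fun s x => s + x)
          ((list.take n).foldl
            (fun (sums : List Int) (r : List Int) => List.zipWith (fun s x => s + x) sums r)
            (List.replicate col.toNat 0)) list[n]).length = col.toNat := by
        rw [List.length_zipWith, ihlen]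
        omega
      rw [PySem.List.pyGetD_eq_getElem _ _ hj0 (by rw [hlen2]; omega)]
      rw [← ihget j hj0 hjc,
        PySem.List.pyGetD_eq_getElem _ _ hj0 (by rw [ihlen]; omega)]
      have hrg : PySem.List.pyGetD (PySem.List.pyGetD list ((n : Nat) : Int) []) j 0
          = (list[n])[j.toNat] := by
        rw [hrowget, PySem.List.pyGetD_eq_getElem _ _ hj0 (by omega)]
      rw [hrg]
      simp [List.getElem_zipWith]

-- Array lookup in B's scan agrees with Python-style list indexing for nonnegative indices.
lemma toArray_getD_eq_pyGetD (xs : List Int) (j : Int) (h : 0 ≤ j) :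
    xs.toArray.getD j.toNat 0 = PySem.List.pyGetD xs j 0 := by
  have hj : j = ((j.toNat : Nat) : Int) := by omega
  rw [hj, PySem.List.pyGetD_natCast, Array.getD_eq_getD_getElem?]
  simp [List.getD]
  have hm : (max j 0).toNat = j.toNat := by omega
  rw [hm]

theorem largeSumColumn_spec : Claim_equal_largeSumColumn := by
  unfold Claim_equal_largeSumColumn
  intro list row col _ hpre
  unfold Spec_largeSumColumn largeSumColumn largeSumColumn_alt
  apply PySem.List.foldl_congr_mem
  intro st j hj
  rw [PySem.List.mem_pyRange_one] at hj
  have hcol : 0 < col := by omega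
  simp only
  rw [toArray_getD_eq_pyGetD _ _ hj.1]
  rw [foldl_zip_snd]
  by_cases hr : 0 < row
  · obtain ⟨h1, h2⟩ := hpre hr hcol
    have hrow : ((row.toNat : Nat) : Int) = row := by omega
    have hlen : (PySem.List.pyRange 0 row 1).length = row.toNat := by
      rw [PySem.List.length_pyRange_one]; norm_num
    obtain ⟨-, hget⟩ := sums_invariant list col row.toNat (by omega)
      (by intro r hr'; exact h2 r hr')
    have hget' := hget j hj.1 hj.2
    rw [hrow] at hget'
    rw [hlen, hget']
  · have hnil : PySem.List.pyRange 0 row 1 = [] := PySem.List.pyRange_one_eq_nil (by omega)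
    rw [hnil]
    simp only [List.length_nil, List.take_zero, List.foldl_nil]
    rw [PySem.List.pyGetD_eq_getElem _ _ hj.1 (by simp; omega)]
    simp
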